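-- pv_equiv track=rewrite | github.com/wony5248/Daily_Study | SWEA 격자판의 숫자 이어 붙히기.py | solution
-- ===== SOURCE A (Python) =====
-- from collections import deque
--
-- def solution(graph):
--     answer = set()
--     dx = (-1, 1, 0, 0)
--     dy = (0, 0, -1, 1)
--
--     for x in range(0, 4):
--         for y in range(0, 4):
--             start = (x, y, graph[x][y])
--
--             q = deque([start])
--
--             while q:
--                 cur_x, cur_y, cur_num = q.popleft()
--
--                 for i in range(4):
--                     nx = cur_x + dx[i]
--                     ny = cur_y + dy[i]
--
--                     if 0 <= nx < 4 and 0 <= ny < 4: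
--                         if len(cur_num) < 6:
--                             q.append((nx, ny, cur_num+graph[nx][ny]))
--                         else:
--                             answer.add(cur_num+graph[nx][ny])
--
--     return len(answer)
-- ===== SOURCE B (Python) =====
-- def solution(graph):
--     answer = set()
--
--     def dfs(x, y, s):
--         for dx, dy in ((-1, 0), (1, 0), (0, -1), (0, 1)):
--             nx, ny = x + dx, y + dy
--             if 0 <= nx < 4 and 0 <= ny < 4:
--                 if len(s) < 6:
--                     dfs(nx, ny, s + graph[nx][ny])
--                 else:
--                     answer.add(s + graph[nx][ny])
--
--     for x in range(4):
--         for y in range(4):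
--             dfs(x, y, graph[x][y])
--
--     return len(answer)
-- ===== Notes on version B (the rewrite author's own statement) =====
-- stated objective: alternative
-- what changed: Replaces A's explicit deque-driven breadth-first expansion (a queue of (x, y, string) states mutated inside a while loop) with a recursive depth-first helper dfs(x, y, s) that expands the same states on the call stack and adds the same length-capped strings to the answer set.
import Mathlib
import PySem

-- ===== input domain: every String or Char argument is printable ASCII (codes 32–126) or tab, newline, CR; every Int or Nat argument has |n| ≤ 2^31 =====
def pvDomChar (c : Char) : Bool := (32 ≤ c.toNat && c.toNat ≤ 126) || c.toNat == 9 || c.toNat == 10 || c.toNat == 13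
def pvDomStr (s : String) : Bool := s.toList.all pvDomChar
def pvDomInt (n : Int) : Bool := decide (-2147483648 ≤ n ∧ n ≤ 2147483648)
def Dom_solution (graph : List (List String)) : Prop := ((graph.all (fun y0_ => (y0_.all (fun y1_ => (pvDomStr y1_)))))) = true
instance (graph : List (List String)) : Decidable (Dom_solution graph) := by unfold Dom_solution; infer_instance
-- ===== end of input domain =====

-- B replaces A's explicit deque BFS with a recursive depth-first search accumulating the same set
-- of strings (alternative decomposition, same cost); only the returned count is claimed equal.

-- ===== PORT A =====
-- the dx/dy direction tuples of both Pythons, zipped into pairs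
def pvDirs : List (Int × Int) := [(-1, 0), (1, 0), (0, -1), (0, 1)]

-- '0 <= nx < 4 and 0 <= ny < 4'
def pvInb (x y : Int) : Bool := decide (0 ≤ x ∧ x < 4 ∧ 0 ≤ y ∧ y < 4)

-- graph[x][y] (two pyGet?); the "" default is never reached under Pre_solution; strings kept as List Char
def pvCell (graph : List (List String)) (x y : Int) : List Char :=
  (((PySem.List.pyGet? graph x).bind fun row => PySem.List.pyGet? row y).getD "").toList

-- the inner 'for i in range(4)' of A's while-body, transforming the (queue, answer) pair
def pvStepA (graph : List (List String)) (cx cy : Int) (s : List Char)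
    (st : List (Int × Int × List Char) × PySem.Set (List Char)) :
    List (Int × Int × List Char) × PySem.Set (List Char) :=
  pvDirs.foldl (fun st d =>
    if pvInb (cx + d.1) (cy + d.2) then
      if s.length < 6 then
        (st.1 ++ [(cx + d.1, cy + d.2, s ++ pvCell graph (cx + d.1) (cy + d.2))], st.2)
      else
        (st.1, PySem.Set.add st.2 (s ++ pvCell graph (cx + d.1) (cy + d.2)))
    else st) st

-- A's 'while q' loop (popleft from the front, append at the back); the fuel only makes the
-- recursion total — 10^10 is never exhausted under Pre_solution (see pvBfsA_mem below)
def pvBfsA (graph : List (List String)) :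
    Nat → List (Int × Int × List Char) → PySem.Set (List Char) → PySem.Set (List Char)
  | _, [], ans => ans
  | 0, _ :: _, ans => ans
  | fuel + 1, (cx, cy, s) :: q, ans =>
      let st := pvStepA graph cx cy s (q, ans)
      pvBfsA graph fuel st.1 st.2

def solution (graph : List (List String)) : Int :=
  PySem.List.len ((PySem.List.pyRange 0 4 1).foldl (fun ans x =>
    (PySem.List.pyRange 0 4 1).foldl (fun ans y =>
      pvBfsA graph 10000000000 [(x, y, pvCell graph x y)] ans) ans) PySem.Set.empty)

-- ===== PORT B =====
-- B's recursive dfs(x, y, s); the fuel only makes the recursion total — 14 is never exhausted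
-- under Pre_solution (see pvDfsB_mem below)
def pvDfsB (graph : List (List String)) :
    Nat → Int → Int → List Char → PySem.Set (List Char) → PySem.Set (List Char)
  | 0, _, _, _, ans => ans
  | fuel + 1, x, y, s, ans =>
      pvDirs.foldl (fun ans d =>
        if pvInb (x + d.1) (y + d.2) then
          if s.length < 6 then
            pvDfsB graph fuel (x + d.1) (y + d.2) (s ++ pvCell graph (x + d.1) (y + d.2)) ans
          else
            PySem.Set.add ans (s ++ pvCell graph (x + d.1) (y + d.2))
        else ans) ans

def solution_alt (graph : List (List String)) : Int :=
  PySem.List.len ((PySem.List.pyRange 0 4 1).foldl (fun ans x =>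
    (PySem.List.pyRange 0 4 1).foldl (fun ans y =>
      pvDfsB graph 14 x y (pvCell graph x y) ans) ans) PySem.Set.empty)

-- ===== PRECONDITION & SPEC =====
-- Pre_ excludes exactly the inputs on which A returns no value: grids without a full 4×4 of
-- entries (A raises IndexError) and grids with two ADJACENT empty strings among the 16 used
-- cells (A's BFS then re-enqueues the same empty string forever and never returns).
def Pre_solution (graph : List (List String)) : Prop :=
  4 ≤ graph.length ∧ (∀ x : Nat, x < 4 → 4 ≤ (graph.getD x []).length) ∧
    ∀ x : Nat, x < 4 → ∀ y : Nat, y < 4 →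
      (x + 1 < 4 → ¬((graph.getD x []).getD y "" = "" ∧ (graph.getD (x + 1) []).getD y "" = "")) ∧
      (y + 1 < 4 → ¬((graph.getD x []).getD y "" = "" ∧ (graph.getD x []).getD (y + 1) "" = ""))
instance (graph : List (List String)) : Decidable (Pre_solution graph) := by
  unfold Pre_solution; infer_instance

def pvWitness_solution : List (List String) :=
  [["abc", "bcd", "cda", "dab"], ["ab1", "bc2", "cd3", "da4"],
   ["xyz", "yzw", "zwx", "wxy"], ["pq1", "qr2", "rs3", "st4"]]

def Spec_solution (graph : List (List String)) (out : Int) : Prop := out = solution_alt graph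
instance (graph : List (List String)) (out : Int) : Decidable (Spec_solution graph out) := by
  unfold Spec_solution; infer_instance

-- ===== CLAIM (what is proved, stated in full; the proofs are below) =====
def Claim_equal_solution : Prop :=
  ∀ (graph : List (List String)), Dom_solution graph → Pre_solution graph →
    Spec_solution graph (solution graph)

-- ===== LEMMAS AND PROOFS =====

-- no two adjacent in-bounds cells are both empty (the consequence of Pre_ the termination needs)
def pvNoAdj (graph : List (List String)) : Prop :=
  ∀ x y : Int, pvInb x y = true → ∀ d ∈ pvDirs, pvInb (x + d.1) (y + d.2) = true →
    ¬(pvCell graph x y = [] ∧ pvCell graph (x + d.1) (y + d.2) = [])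

-- the set of strings the process emits from state (x, y, s): expand while len < 6, emit s+cell after
inductive pvReach (graph : List (List String)) : Int → Int → List Char → List Char → Prop
  | expand {x y : Int} {s : List Char} {d : Int × Int} {t : List Char} :
      d ∈ pvDirs → pvInb (x + d.1) (y + d.2) = true → s.length < 6 →
      pvReach graph (x + d.1) (y + d.2) (s ++ pvCell graph (x + d.1) (y + d.2)) t →
      pvReach graph x y s t
  | emit {x y : Int} {s : List Char} {d : Int × Int} :
      d ∈ pvDirs → pvInb (x + d.1) (y + d.2) = true → ¬ s.length < 6 →
      pvReach graph x y s (s ++ pvCell graph (x + d.1) (y + d.2))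

-- potential of a queue entry / queue: bounds the number of pops BFS still performs
-- (every step either lengthens the string, or lands on an empty cell whose own steps all lengthen it)
def pvW (s : List Char) : Nat := 6 - min s.length 6
def pvMu (graph : List (List String)) (x y : Int) (s : List Char) : Nat :=
  2 * pvW s + (if pvCell graph x y = [] then 0 else 1)
def pvPhi (graph : List (List String)) (x y : Int) (s : List Char) : Nat :=
  5 ^ pvMu graph x y s
def pvPot (graph : List (List String)) (q : List (Int × Int × List Char)) : Nat :=
  (q.map fun e => pvPhi graph e.1 e.2.1 e.2.2).sum

theorem pvCell_empty_iff (graph : List (List String)) (h4 : 4 ≤ graph.length)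
    (hrl : ∀ x : Nat, x < 4 → 4 ≤ (graph.getD x []).length) (a b : Int)
    (ha0 : 0 ≤ a) (ha4 : a < 4) (hb0 : 0 ≤ b) (hb4 : b < 4) :
    (pvCell graph a b = [] ↔ (graph.getD a.toNat []).getD b.toNat "" = "") := by
  have hxg : a.toNat < graph.length := by omega
  have hrow : graph.getD a.toNat [] = graph[a.toNat] := List.getD_eq_getElem _ _ hxg
  have hrl4 := hrl a.toNat (by omega)
  have hyg : b.toNat < graph[a.toNat].length := by rw [← hrow]; omega
  have hcell : (graph.getD a.toNat []).getD b.toNat "" = graph[a.toNat][b.toNat] := by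
    rw [hrow]; exact List.getD_eq_getElem _ _ hyg
  rw [hcell]
  simp only [pvCell]
  rw [PySem.List.pyGet?_of_nonneg graph ha0, List.getElem?_eq_getElem hxg]
  simp only [Option.bind_some]
  rw [PySem.List.pyGet?_of_nonneg graph[a.toNat] hb0, List.getElem?_eq_getElem hyg]
  simp only [Option.getD_some]
  exact String.toList_eq_nil_iff

theorem pvNoAdj_of_pre (graph : List (List String)) (h : Pre_solution graph) :
    pvNoAdj graph := by
  obtain ⟨h4, hrl, hadj⟩ := h
  intro x y hxy d hd hb hcc
  obtain ⟨hcp, hcn⟩ := hcc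
  simp only [pvInb, decide_eq_true_eq] at hxy hb
  obtain ⟨hx0, hx4, hy0, hy4⟩ := hxy
  obtain ⟨hnx0, hnx4, hny0, hny4⟩ := hb
  rw [pvCell_empty_iff graph h4 hrl x y hx0 hx4 hy0 hy4] at hcp
  rw [pvCell_empty_iff graph h4 hrl _ _ hnx0 hnx4 hny0 hny4] at hcn
  simp only [pvDirs, List.mem_cons, List.not_mem_nil, or_false] at hd
  rcases hd with rfl | rfl | rfl | rfl
  · -- d = (-1, 0): the pair ((x-1, y), (x, y)) is horizontal with left cell x - 1
    have e1 : (x + (-1 : Int)).toNat + 1 = x.toNat := by omega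
    have e2 : (y + (0 : Int)).toNat = y.toNat := by omega
    have := (hadj (x + (-1)).toNat (by omega) y.toNat (by omega)).1 (by omega)
    rw [e1] at this
    rw [e2] at hcn
    exact this ⟨hcn, hcp⟩
  · -- d = (1, 0)
    have e1 : (x + (1 : Int)).toNat = x.toNat + 1 := by omega
    have e2 : (y + (0 : Int)).toNat = y.toNat := by omega
    have := (hadj x.toNat (by omega) y.toNat (by omega)).1 (by omega)
    rw [e1] at hcn
    rw [e2] at hcn
    exact this ⟨hcp, hcn⟩
  · -- d = (0, -1)
    have e1 : (x + (0 : Int)).toNat = x.toNat := by omega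
    have e2 : (y + (-1 : Int)).toNat + 1 = y.toNat := by omega
    have := (hadj x.toNat (by omega) (y + (-1)).toNat (by omega)).2 (by omega)
    rw [e2] at this
    rw [e1] at hcn
    exact this ⟨hcn, hcp⟩
  · -- d = (0, 1)
    have e1 : (x + (0 : Int)).toNat = x.toNat := by omega
    have e2 : (y + (1 : Int)).toNat = y.toNat + 1 := by omega
    have := (hadj x.toNat (by omega) y.toNat (by omega)).2 (by omega)
    rw [e1] at hcn
    rw [e2] at hcn
    exact this ⟨hcp, hcn⟩

theorem pvReach_iff (graph : List (List String)) (x y : Int) (s t : List Char) :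
    pvReach graph x y s t ↔ ∃ d ∈ pvDirs, pvInb (x + d.1) (y + d.2) = true ∧
      ((s.length < 6 ∧ pvReach graph (x + d.1) (y + d.2) (s ++ pvCell graph (x + d.1) (y + d.2)) t) ∨
       (¬ s.length < 6 ∧ t = s ++ pvCell graph (x + d.1) (y + d.2))) := by
  constructor
  · intro h
    cases h with
    | expand hd hb hl hr => exact ⟨_, hd, hb, Or.inl ⟨hl, hr⟩⟩
    | emit hd hb hl => exact ⟨_, hd, hb, Or.inr ⟨hl, rfl⟩⟩
  · rintro ⟨d, hd, hb, (⟨hl, hr⟩ | ⟨hl, rfl⟩)⟩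
    · exact pvReach.expand hd hb hl hr
    · exact pvReach.emit hd hb hl

theorem pvW_append_lt (s c : List Char) (hc : c ≠ []) (hs : s.length < 6) :
    pvW (s ++ c) < pvW s := by
  simp only [pvW, List.length_append]
  cases c with
  | nil => exact absurd rfl hc
  | cons a l => simp only [List.length_cons]; omega

-- one step of the process strictly shrinks the measure: either the string grows, or the step
-- lands on an empty cell, which (having no empty neighbour) came from a nonempty one
theorem pvMu_child_lt (graph : List (List String)) (hna : pvNoAdj graph) (x y : Int)
    (s : List Char) (hxy : pvInb x y = true) {d : Int × Int} (hd : d ∈ pvDirs)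
    (hb : pvInb (x + d.1) (y + d.2) = true) (hl : s.length < 6) :
    pvMu graph (x + d.1) (y + d.2) (s ++ pvCell graph (x + d.1) (y + d.2)) <
      pvMu graph x y s := by
  have hw1 : 1 ≤ pvW s := by simp only [pvW]; omega
  by_cases hc : pvCell graph (x + d.1) (y + d.2) = []
  · have hp : ¬ pvCell graph x y = [] := fun hp => hna x y hxy d hd hb ⟨hp, hc⟩
    rw [hc, List.append_nil]
    simp only [pvMu, if_pos hc, if_neg hp]
    omega
  · have hlt := pvW_append_lt s _ hc hl
    simp only [pvMu, if_neg hc]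
    split_ifs <;> omega

theorem pvDfsB_mem (graph : List (List String)) (hna : pvNoAdj graph) :
    ∀ (fuel : Nat) (x y : Int) (s : List Char) (ans : PySem.Set (List Char)) (t : List Char),
      pvInb x y = true → pvMu graph x y s < fuel →
      (t ∈ pvDfsB graph fuel x y s ans ↔ t ∈ ans ∨ pvReach graph x y s t) := by
  intro fuel
  induction fuel with
  | zero => intro x y s ans t _ hf; exact absurd hf (Nat.not_lt_zero _)
  | succ fuel ih =>
    intro x y s ans t hxy hf
    have key : ∀ ds : List (Int × Int), (∀ d ∈ ds, d ∈ pvDirs) → ∀ ans : PySem.Set (List Char),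
        (t ∈ ds.foldl (fun ans d =>
          if pvInb (x + d.1) (y + d.2) then
            if s.length < 6 then
              pvDfsB graph fuel (x + d.1) (y + d.2) (s ++ pvCell graph (x + d.1) (y + d.2)) ans
            else
              PySem.Set.add ans (s ++ pvCell graph (x + d.1) (y + d.2))
          else ans) ans ↔
        t ∈ ans ∨ ∃ d ∈ ds, pvInb (x + d.1) (y + d.2) = true ∧
          ((s.length < 6 ∧ pvReach graph (x + d.1) (y + d.2) (s ++ pvCell graph (x + d.1) (y + d.2)) t) ∨
           (¬ s.length < 6 ∧ t = s ++ pvCell graph (x + d.1) (y + d.2)))) := by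
      intro ds
      induction ds with
      | nil => intro _ ans; simp
      | cons d ds ihds =>
        intro hsub ans
        simp only [List.foldl_cons]
        rw [ihds (fun e he => hsub e (List.mem_cons_of_mem _ he))]
        simp only [List.exists_mem_cons_iff]
        by_cases hb : pvInb (x + d.1) (y + d.2) = true
        · rw [if_pos hb]
          by_cases hl : s.length < 6
          · rw [if_pos hl]
            have hchild : pvMu graph (x + d.1) (y + d.2)
                (s ++ pvCell graph (x + d.1) (y + d.2)) < fuel := by
              have := pvMu_child_lt graph hna x y s hxy (hsub d List.mem_cons_self) hb hl
              omega
            rw [ih _ _ _ _ _ hb hchild]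
            constructor
            · rintro ((h | hr) | h)
              · exact Or.inl h
              · exact Or.inr (Or.inl ⟨hb, Or.inl ⟨hl, hr⟩⟩)
              · exact Or.inr (Or.inr h)
            · rintro (h | ⟨_, (⟨_, hr⟩ | ⟨hnl, _⟩)⟩ | h)
              · exact Or.inl (Or.inl h)
              · exact Or.inl (Or.inr hr)
              · exact absurd hl hnl
              · exact Or.inr h
          · rw [if_neg hl, PySem.Set.mem_add]
            constructor
            · rintro ((h | he) | h)
              · exact Or.inl h
              · exact Or.inr (Or.inl ⟨hb, Or.inr ⟨hl, he⟩⟩)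
              · exact Or.inr (Or.inr h)
            · rintro (h | ⟨_, (⟨hl6, _⟩ | ⟨_, he⟩)⟩ | h)
              · exact Or.inl (Or.inl h)
              · exact absurd hl6 hl
              · exact Or.inl (Or.inr he)
              · exact Or.inr h
        · rw [if_neg hb]
          constructor
          · rintro (h | h)
            · exact Or.inl h
            · exact Or.inr (Or.inr h)
          · rintro (h | ⟨hbt, _⟩ | h)
            · exact Or.inl h
            · exact absurd hbt hb
            · exact Or.inr h
    rw [pvReach_iff]
    simp only [pvDfsB]
    exact key pvDirs (fun _ h => h) ans

-- the inner for-loop of A only pushes when len < 6 …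
theorem pvStepA_lt (graph : List (List String)) (cx cy : Int) (s : List Char)
    (hl : s.length < 6) (q : List (Int × Int × List Char)) (ans : PySem.Set (List Char)) :
    pvStepA graph cx cy s (q, ans) =
      (q ++ (pvDirs.filter fun d => pvInb (cx + d.1) (cy + d.2)).map
        (fun d => (cx + d.1, cy + d.2, s ++ pvCell graph (cx + d.1) (cy + d.2))), ans) := by
  have key : ∀ (ds : List (Int × Int)) (q : List (Int × Int × List Char)),
      ds.foldl (fun st d =>
        if pvInb (cx + d.1) (cy + d.2) then
          if s.length < 6 then
            (st.1 ++ [(cx + d.1, cy + d.2, s ++ pvCell graph (cx + d.1) (cy + d.2))], st.2)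
          else
            (st.1, PySem.Set.add st.2 (s ++ pvCell graph (cx + d.1) (cy + d.2)))
        else st) (q, ans) =
      (q ++ (ds.filter fun d => pvInb (cx + d.1) (cy + d.2)).map
        (fun d => (cx + d.1, cy + d.2, s ++ pvCell graph (cx + d.1) (cy + d.2))), ans) := by
    intro ds
    induction ds with
    | nil => intro q; simp
    | cons d ds ihds =>
      intro q
      simp only [List.foldl_cons, List.filter_cons]
      by_cases hb : pvInb (cx + d.1) (cy + d.2) = true
      · rw [if_pos hb, if_pos hl, ihds, hb]
        simp
      · rw [if_neg hb]
        simp only [Bool.not_eq_true] at hb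
        rw [hb]
        simp only [Bool.false_eq_true, if_false]
        exact ihds q
  exact key pvDirs q

-- … and only adds to the answer set when len ≥ 6
theorem pvStepA_ge (graph : List (List String)) (cx cy : Int) (s : List Char)
    (hl : ¬ s.length < 6) (q : List (Int × Int × List Char)) (ans : PySem.Set (List Char)) :
    pvStepA graph cx cy s (q, ans) =
      (q, (pvDirs.filter fun d => pvInb (cx + d.1) (cy + d.2)).foldl
        (fun ans d => PySem.Set.add ans (s ++ pvCell graph (cx + d.1) (cy + d.2))) ans) := by
  have key : ∀ (ds : List (Int × Int)) (ans : PySem.Set (List Char)),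
      ds.foldl (fun st d =>
        if pvInb (cx + d.1) (cy + d.2) then
          if s.length < 6 then
            (st.1 ++ [(cx + d.1, cy + d.2, s ++ pvCell graph (cx + d.1) (cy + d.2))], st.2)
          else
            (st.1, PySem.Set.add st.2 (s ++ pvCell graph (cx + d.1) (cy + d.2)))
        else st) (q, ans) =
      (q, (ds.filter fun d => pvInb (cx + d.1) (cy + d.2)).foldl
        (fun ans d => PySem.Set.add ans (s ++ pvCell graph (cx + d.1) (cy + d.2))) ans) := by
    intro ds
    induction ds with
    | nil => intro ans; simp
    | cons d ds ihds =>
      intro ans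
      simp only [List.foldl_cons, List.filter_cons]
      by_cases hb : pvInb (cx + d.1) (cy + d.2) = true
      · rw [if_pos hb, if_neg hl, hb]
        simp only [if_true]
        rw [ihds]
        simp
      · rw [if_neg hb]
        simp only [Bool.not_eq_true] at hb
        rw [hb]
        simp only [Bool.false_eq_true, if_false]
        exact ihds ans
  exact key pvDirs ans

theorem pvPot_cons (graph : List (List String)) (cx cy : Int) (s : List Char)
    (q : List (Int × Int × List Char)) :
    pvPot graph ((cx, cy, s) :: q) = pvPhi graph cx cy s + pvPot graph q := by
  simp [pvPot]

theorem pvPot_append (graph : List (List String)) (q r : List (Int × Int × List Char)) :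
    pvPot graph (q ++ r) = pvPot graph q + pvPot graph r := by
  simp [pvPot]

-- the items pushed for a popped string of length < 6 carry strictly less potential than it
theorem pvPot_children_lt (graph : List (List String)) (hna : pvNoAdj graph)
    (cx cy : Int) (hxy : pvInb cx cy = true) (s : List Char) (hl : s.length < 6) :
    pvPot graph ((pvDirs.filter fun d => pvInb (cx + d.1) (cy + d.2)).map
      (fun d => (cx + d.1, cy + d.2, s ++ pvCell graph (cx + d.1) (cy + d.2)))) <
      pvPhi graph cx cy s := by
  have hmu : 1 ≤ pvMu graph cx cy s := by
    simp only [pvMu, pvW]; split_ifs <;> omega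
  have hbound : ∀ n ∈ ((pvDirs.filter fun d => pvInb (cx + d.1) (cy + d.2)).map
      (fun d => (cx + d.1, cy + d.2, s ++ pvCell graph (cx + d.1) (cy + d.2)))).map
        (fun e => pvPhi graph e.1 e.2.1 e.2.2), n ≤ 5 ^ (pvMu graph cx cy s - 1) := by
    intro n hn
    simp only [List.mem_map, List.mem_filter] at hn
    obtain ⟨e, ⟨d, ⟨hd, hb⟩, rfl⟩, rfl⟩ := hn
    have hlt := pvMu_child_lt graph hna cx cy s hxy hd hb hl
    show (5 : Nat) ^ pvMu graph (cx + d.1) (cy + d.2)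
        (s ++ pvCell graph (cx + d.1) (cy + d.2)) ≤ 5 ^ (pvMu graph cx cy s - 1)
    exact Nat.pow_le_pow_right (by norm_num) (by omega)
  have hsum := List.sum_le_card_nsmul _ _ hbound
  have hflen : ((pvDirs.filter fun d => pvInb (cx + d.1) (cy + d.2))).length ≤ 4 :=
    le_trans (List.length_filter_le _ _) (by norm_num [pvDirs])
  have h5 : (5 : Nat) ^ pvMu graph cx cy s = 5 ^ (pvMu graph cx cy s - 1) * 5 := by
    rw [← pow_succ]
    congr 1
    omega
  simp only [pvPot, List.length_map, smul_eq_mul] at hsum ⊢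
  calc _ ≤ _ := hsum
    _ ≤ 4 * 5 ^ (pvMu graph cx cy s - 1) := Nat.mul_le_mul_right _ hflen
    _ < pvPhi graph cx cy s := by
        have hX : 1 ≤ 5 ^ (pvMu graph cx cy s - 1) := Nat.one_le_pow _ _ (by norm_num)
        simp only [pvPhi, h5]
        omega

-- an expandable head reaches exactly what some pushed child reaches
theorem pvHead_lt (graph : List (List String)) (cx cy : Int) (s t : List Char)
    (hl : s.length < 6) :
    pvReach graph cx cy s t ↔ ∃ d ∈ pvDirs, pvInb (cx + d.1) (cy + d.2) = true ∧
      pvReach graph (cx + d.1) (cy + d.2) (s ++ pvCell graph (cx + d.1) (cy + d.2)) t := by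
  rw [pvReach_iff]
  constructor
  · rintro ⟨d, hd, hb, (⟨_, hr⟩ | ⟨hnl, _⟩)⟩
    · exact ⟨d, hd, hb, hr⟩
    · exact absurd hl hnl
  · rintro ⟨d, hd, hb, hr⟩
    exact ⟨d, hd, hb, Or.inl ⟨hl, hr⟩⟩

-- a finished head reaches exactly the strings it emits
theorem pvHead_ge (graph : List (List String)) (cx cy : Int) (s t : List Char)
    (hl : ¬ s.length < 6) :
    pvReach graph cx cy s t ↔ ∃ d ∈ pvDirs, pvInb (cx + d.1) (cy + d.2) = true ∧
      t = s ++ pvCell graph (cx + d.1) (cy + d.2) := by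
  rw [pvReach_iff]
  constructor
  · rintro ⟨d, hd, hb, (⟨hl6, _⟩ | ⟨_, he⟩)⟩
    · exact absurd hl6 hl
    · exact ⟨d, hd, hb, he⟩
  · rintro ⟨d, hd, hb, he⟩
    exact ⟨d, hd, hb, Or.inr ⟨hl, he⟩⟩

theorem pvBfsA_mem (graph : List (List String)) (hna : pvNoAdj graph) :
    ∀ (fuel : Nat) (q : List (Int × Int × List Char)) (ans : PySem.Set (List Char)) (t : List Char),
      (∀ e ∈ q, pvInb e.1 e.2.1 = true) → pvPot graph q < fuel →
      (t ∈ pvBfsA graph fuel q ans ↔ t ∈ ans ∨ ∃ e ∈ q, pvReach graph e.1 e.2.1 e.2.2 t) := by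
  intro fuel
  induction fuel with
  | zero => intro q ans t _ hf; exact absurd hf (Nat.not_lt_zero _)
  | succ fuel ih =>
    intro q ans t hq hf
    match q with
    | [] => simp [pvBfsA]
    | (cx, cy, s) :: q' =>
      have hxy : pvInb cx cy = true := hq _ List.mem_cons_self
      have hq' : ∀ e ∈ q', pvInb e.1 e.2.1 = true :=
        fun e he => hq _ (List.mem_cons_of_mem _ he)
      rw [pvPot_cons graph cx cy s q'] at hf
      simp only [pvBfsA]
      by_cases hl : s.length < 6
      · rw [pvStepA_lt graph cx cy s hl q' ans]
        have hch := pvPot_children_lt graph hna cx cy hxy s hl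
        have hpot : pvPot graph (q' ++ (pvDirs.filter fun d => pvInb (cx + d.1) (cy + d.2)).map
            (fun d => (cx + d.1, cy + d.2, s ++ pvCell graph (cx + d.1) (cy + d.2)))) < fuel := by
          rw [pvPot_append]; omega
        have hqapp : ∀ e ∈ q' ++ (pvDirs.filter fun d => pvInb (cx + d.1) (cy + d.2)).map
            (fun d => (cx + d.1, cy + d.2, s ++ pvCell graph (cx + d.1) (cy + d.2))),
            pvInb e.1 e.2.1 = true := by
          intro e he
          rcases List.mem_append.mp he with he | he
          · exact hq' e he
          · simp only [List.mem_map, List.mem_filter] at he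
            obtain ⟨d, ⟨_, hb⟩, rfl⟩ := he
            exact hb
        rw [ih _ _ _ hqapp hpot]
        simp only [List.exists_mem_cons_iff, List.mem_append]
        constructor
        · rintro (h | ⟨e, he, hr⟩)
          · exact Or.inl h
          · rcases he with he | he
            · exact Or.inr (Or.inr ⟨e, he, hr⟩)
            · simp only [List.mem_map, List.mem_filter] at he
              obtain ⟨d, ⟨hd, hb⟩, rfl⟩ := he
              exact Or.inr (Or.inl ((pvHead_lt graph cx cy s t hl).mpr ⟨d, hd, hb, hr⟩))
        · rintro (h | hhead | ⟨e, he, hr⟩)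
          · exact Or.inl h
          · obtain ⟨d, hd, hb, hr⟩ := (pvHead_lt graph cx cy s t hl).mp hhead
            refine Or.inr ⟨(cx + d.1, cy + d.2, s ++ pvCell graph (cx + d.1) (cy + d.2)),
              Or.inr ?_, hr⟩
            simp only [List.mem_map, List.mem_filter]
            exact ⟨d, ⟨hd, hb⟩, rfl⟩
          · exact Or.inr ⟨e, Or.inl he, hr⟩
      · rw [pvStepA_ge graph cx cy s hl q' ans]
        have hpot : pvPot graph q' < fuel := by
          have : 1 ≤ pvPhi graph cx cy s := Nat.one_le_pow _ _ (by norm_num)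
          omega
        rw [ih _ _ _ hq' hpot, PySem.Set.mem_foldl_add]
        simp only [List.exists_mem_cons_iff]
        constructor
        · rintro ((h | ⟨d, hd, he⟩) | ⟨e, he, hr⟩)
          · exact Or.inl h
          · simp only [List.mem_filter] at hd
            exact Or.inr (Or.inl ((pvHead_ge graph cx cy s t hl).mpr ⟨d, hd.1, hd.2, he⟩))
          · exact Or.inr (Or.inr ⟨e, he, hr⟩)
        · rintro (h | hhead | ⟨e, he, hr⟩)
          · exact Or.inl (Or.inl h)
          · obtain ⟨d, hd, hb, he⟩ := (pvHead_ge graph cx cy s t hl).mp hhead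
            refine Or.inl (Or.inr ⟨d, ?_, he⟩)
            simp only [List.mem_filter]
            exact ⟨hd, hb⟩
          · exact Or.inr ⟨e, he, hr⟩

theorem pvDfsB_nodup (graph : List (List String)) :
    ∀ (fuel : Nat) (x y : Int) (s : List Char) (ans : PySem.Set (List Char)),
      ans.Nodup → (pvDfsB graph fuel x y s ans).Nodup := by
  intro fuel
  induction fuel with
  | zero => intro x y s ans h; exact h
  | succ fuel ih =>
    intro x y s ans h
    simp only [pvDfsB]
    have key : ∀ (ds : List (Int × Int)) (ans : PySem.Set (List Char)), ans.Nodup →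
        (ds.foldl (fun ans d =>
          if pvInb (x + d.1) (y + d.2) then
            if s.length < 6 then
              pvDfsB graph fuel (x + d.1) (y + d.2) (s ++ pvCell graph (x + d.1) (y + d.2)) ans
            else
              PySem.Set.add ans (s ++ pvCell graph (x + d.1) (y + d.2))
          else ans) ans).Nodup := by
      intro ds
      induction ds with
      | nil => intro ans h; exact h
      | cons d ds ihds =>
        intro ans h
        simp only [List.foldl_cons]
        apply ihds
        by_cases hb : pvInb (x + d.1) (y + d.2) = true
        · rw [if_pos hb]
          by_cases hl : s.length < 6
          · rw [if_pos hl]; exact ih _ _ _ _ h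
          · rw [if_neg hl]; exact PySem.Set.nodup_add _ _ h
        · rw [if_neg hb]; exact h
    exact key pvDirs ans h

theorem pvBfsA_nodup (graph : List (List String)) :
    ∀ (fuel : Nat) (q : List (Int × Int × List Char)) (ans : PySem.Set (List Char)),
      ans.Nodup → (pvBfsA graph fuel q ans).Nodup := by
  intro fuel
  induction fuel with
  | zero =>
    intro q ans h
    match q with
    | [] => exact h
    | _ :: _ => exact h
  | succ fuel ih =>
    intro q ans h
    match q with
    | [] => exact h
    | (cx, cy, s) :: q' =>
      simp only [pvBfsA]
      by_cases hl : s.length < 6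
      · rw [pvStepA_lt graph cx cy s hl q' ans]
        exact ih _ _ h
      · rw [pvStepA_ge graph cx cy s hl q' ans]
        apply ih
        rw [← PySem.Set.update_map_eq_foldl_add]
        exact PySem.Set.nodup_update _ _ h

theorem pvPot_singleton_lt (graph : List (List String)) (x y : Int) (s : List Char) :
    pvPot graph [(x, y, s)] < 10000000000 := by
  have h1 : pvMu graph x y s ≤ 13 := by simp only [pvMu, pvW]; split_ifs <;> omega
  have h2 := Nat.pow_le_pow_right (show 1 ≤ 5 by norm_num) h1
  simp only [pvPot, List.map_cons, List.map_nil, List.sum_cons, List.sum_nil, pvPhi]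
  norm_num at h2 ⊢
  omega

theorem pvMu_lt_14 (graph : List (List String)) (x y : Int) (s : List Char) :
    pvMu graph x y s < 14 := by
  simp only [pvMu, pvW]; split_ifs <;> omega

theorem pvInnerA_mem (graph : List (List String)) (hna : pvNoAdj graph) (x : Int) (t : List Char) :
    ∀ (ys : List Int) (ans : PySem.Set (List Char)), (∀ y ∈ ys, pvInb x y = true) →
      (t ∈ ys.foldl (fun ans y => pvBfsA graph 10000000000 [(x, y, pvCell graph x y)] ans) ans ↔
      t ∈ ans ∨ ∃ y ∈ ys, pvReach graph x y (pvCell graph x y) t) := by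
  intro ys
  induction ys with
  | nil => intro ans _; simp
  | cons y ys ihys =>
    intro ans hys
    simp only [List.foldl_cons]
    have hsingle : ∀ e ∈ [(x, y, pvCell graph x y)], pvInb e.1 e.2.1 = true := by
      intro e he
      simp only [List.mem_singleton] at he
      subst he
      exact hys y List.mem_cons_self
    rw [ihys _ (fun y hy => hys y (List.mem_cons_of_mem _ hy)),
      pvBfsA_mem graph hna _ _ _ _ hsingle (pvPot_singleton_lt graph x y (pvCell graph x y))]
    simp only [List.exists_mem_cons_iff, List.mem_singleton, exists_eq_left]
    constructor
    · rintro ((h | hr) | h)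
      · exact Or.inl h
      · exact Or.inr (Or.inl hr)
      · exact Or.inr (Or.inr h)
    · rintro (h | hr | h)
      · exact Or.inl (Or.inl h)
      · exact Or.inl (Or.inr hr)
      · exact Or.inr h

theorem pvInnerB_mem (graph : List (List String)) (hna : pvNoAdj graph) (x : Int) (t : List Char) :
    ∀ (ys : List Int) (ans : PySem.Set (List Char)), (∀ y ∈ ys, pvInb x y = true) →
      (t ∈ ys.foldl (fun ans y => pvDfsB graph 14 x y (pvCell graph x y) ans) ans ↔
      t ∈ ans ∨ ∃ y ∈ ys, pvReach graph x y (pvCell graph x y) t) := by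
  intro ys
  induction ys with
  | nil => intro ans _; simp
  | cons y ys ihys =>
    intro ans hys
    simp only [List.foldl_cons]
    rw [ihys _ (fun y hy => hys y (List.mem_cons_of_mem _ hy)),
      pvDfsB_mem graph hna _ _ _ _ _ _ (hys y List.mem_cons_self)
        (pvMu_lt_14 graph x y (pvCell graph x y))]
    simp only [List.exists_mem_cons_iff]
    constructor
    · rintro ((h | hr) | h)
      · exact Or.inl h
      · exact Or.inr (Or.inl hr)
      · exact Or.inr (Or.inr h)
    · rintro (h | hr | h)
      · exact Or.inl (Or.inl h)
      · exact Or.inl (Or.inr hr)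
      · exact Or.inr h

theorem pvFoldA_mem (graph : List (List String)) (hna : pvNoAdj graph) (t : List Char) :
    ∀ (xs : List Int) (ans : PySem.Set (List Char)),
      (∀ x ∈ xs, ∀ y ∈ PySem.List.pyRange 0 4 1, pvInb x y = true) →
      (t ∈ xs.foldl (fun ans x => (PySem.List.pyRange 0 4 1).foldl (fun ans y =>
          pvBfsA graph 10000000000 [(x, y, pvCell graph x y)] ans) ans) ans ↔
      t ∈ ans ∨ ∃ x ∈ xs, ∃ y ∈ PySem.List.pyRange 0 4 1,
        pvReach graph x y (pvCell graph x y) t) := by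
  intro xs
  induction xs with
  | nil => intro ans _; simp
  | cons x xs ihxs =>
    intro ans hxs
    simp only [List.foldl_cons]
    rw [ihxs _ (fun x hx => hxs x (List.mem_cons_of_mem _ hx)),
      pvInnerA_mem graph hna x t _ _ (hxs x List.mem_cons_self)]
    simp only [List.exists_mem_cons_iff]
    constructor
    · rintro ((h | hr) | h)
      · exact Or.inl h
      · exact Or.inr (Or.inl hr)
      · exact Or.inr (Or.inr h)
    · rintro (h | hr | h)
      · exact Or.inl (Or.inl h)
      · exact Or.inl (Or.inr hr)
      · exact Or.inr h

theorem pvFoldB_mem (graph : List (List String)) (hna : pvNoAdj graph) (t : List Char) :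
    ∀ (xs : List Int) (ans : PySem.Set (List Char)),
      (∀ x ∈ xs, ∀ y ∈ PySem.List.pyRange 0 4 1, pvInb x y = true) →
      (t ∈ xs.foldl (fun ans x => (PySem.List.pyRange 0 4 1).foldl (fun ans y =>
          pvDfsB graph 14 x y (pvCell graph x y) ans) ans) ans ↔
      t ∈ ans ∨ ∃ x ∈ xs, ∃ y ∈ PySem.List.pyRange 0 4 1,
        pvReach graph x y (pvCell graph x y) t) := by
  intro xs
  induction xs with
  | nil => intro ans _; simp
  | cons x xs ihxs =>
    intro ans hxs
    simp only [List.foldl_cons]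
    rw [ihxs _ (fun x hx => hxs x (List.mem_cons_of_mem _ hx)),
      pvInnerB_mem graph hna x t _ _ (hxs x List.mem_cons_self)]
    simp only [List.exists_mem_cons_iff]
    constructor
    · rintro ((h | hr) | h)
      · exact Or.inl h
      · exact Or.inr (Or.inl hr)
      · exact Or.inr (Or.inr h)
    · rintro (h | hr | h)
      · exact Or.inl (Or.inl h)
      · exact Or.inl (Or.inr hr)
      · exact Or.inr h

theorem pvFoldA_nodup (graph : List (List String)) :
    ∀ (xs : List Int) (ans : PySem.Set (List Char)), ans.Nodup →
      (xs.foldl (fun ans x => (PySem.List.pyRange 0 4 1).foldl (fun ans y =>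
          pvBfsA graph 10000000000 [(x, y, pvCell graph x y)] ans) ans) ans).Nodup := by
  have inner : ∀ (x : Int) (ys : List Int) (ans : PySem.Set (List Char)), ans.Nodup →
      (ys.foldl (fun ans y => pvBfsA graph 10000000000 [(x, y, pvCell graph x y)] ans) ans).Nodup := by
    intro x ys
    induction ys with
    | nil => intro ans h; exact h
    | cons y ys ihys =>
      intro ans h
      simp only [List.foldl_cons]
      exact ihys _ (pvBfsA_nodup graph _ _ _ h)
  intro xs
  induction xs with
  | nil => intro ans h; exact h
  | cons x xs ihxs =>
    intro ans h
    simp only [List.foldl_cons]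
    exact ihxs _ (inner x _ _ h)

theorem pvFoldB_nodup (graph : List (List String)) :
    ∀ (xs : List Int) (ans : PySem.Set (List Char)), ans.Nodup →
      (xs.foldl (fun ans x => (PySem.List.pyRange 0 4 1).foldl (fun ans y =>
          pvDfsB graph 14 x y (pvCell graph x y) ans) ans) ans).Nodup := by
  have inner : ∀ (x : Int) (ys : List Int) (ans : PySem.Set (List Char)), ans.Nodup →
      (ys.foldl (fun ans y => pvDfsB graph 14 x y (pvCell graph x y) ans) ans).Nodup := by
    intro x ys
    induction ys with
    | nil => intro ans h; exact h
    | cons y ys ihys =>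
      intro ans h
      simp only [List.foldl_cons]
      exact ihys _ (pvDfsB_nodup graph _ _ _ _ _ h)
  intro xs
  induction xs with
  | nil => intro ans h; exact h
  | cons x xs ihxs =>
    intro ans h
    simp only [List.foldl_cons]
    exact ihxs _ (inner x _ _ h)

-- ===== VERDICT (by name: the statement is the Claim_ definition above) =====
theorem solution_spec : Claim_equal_solution := by
  intro graph _hdom hpre
  have hna := pvNoAdj_of_pre graph hpre
  have hinb : ∀ x ∈ PySem.List.pyRange 0 4 1, ∀ y ∈ PySem.List.pyRange 0 4 1,
      pvInb x y = true := by decide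
  show solution graph = solution_alt graph
  have hA := pvFoldA_nodup graph (PySem.List.pyRange 0 4 1) PySem.Set.empty List.nodup_nil
  have hB := pvFoldB_nodup graph (PySem.List.pyRange 0 4 1) PySem.Set.empty List.nodup_nil
  have hmem : ∀ t, t ∈ (PySem.List.pyRange 0 4 1).foldl (fun ans x =>
      (PySem.List.pyRange 0 4 1).foldl (fun ans y =>
        pvBfsA graph 10000000000 [(x, y, pvCell graph x y)] ans) ans) PySem.Set.empty ↔
      t ∈ (PySem.List.pyRange 0 4 1).foldl (fun ans x =>
      (PySem.List.pyRange 0 4 1).foldl (fun ans y =>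
        pvDfsB graph 14 x y (pvCell graph x y) ans) ans) PySem.Set.empty := by
    intro t
    rw [pvFoldA_mem graph hna t _ _ hinb, pvFoldB_mem graph hna t _ _ hinb]
  have hperm := (List.perm_ext_iff_of_nodup hA hB).mpr hmem
  simp only [solution, solution_alt, PySem.List.len_eq]
  exact congrArg Nat.cast hperm.length_eq
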